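-- pv_equiv track=rewrite | github.com/Cyberspace-ma/Activelabs-CTF-2025-FINAL | MISC/Spiral Dance/chall.py | spiral_dance
-- ===== SOURCE A (Python) =====
-- def spiral_dance(n, steps=0):
--     if steps >= 6:
--         return n
--     if n < 10:
--         return spiral_dance(n + 13, steps + 1)  # Small numbers jump outward
--     elif n > 100:
--         return spiral_dance(n // 2 - 7, steps + 1)  # Big numbers spiral inward
--     else:
--         return spiral_dance(n * 3 % 137, steps + 1)  # Middle numbers twist
-- ===== SOURCE B (Python) =====
-- def spiral_dance(n, steps=0):
--     while steps < 6:
--         if n < 10: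
--             n += 13
--         elif n > 100:
--             n = n // 2 - 7
--         else:
--             n = n * 3 % 137
--         steps += 1
--     return n
-- ===== Notes on version B (the rewrite author's own statement) =====
-- stated objective: idiomatic
-- what changed: Replaced the fixed-depth tail recursion with an iterative while-loop that updates n in place and counts steps up to the cap; Pre_ keeps a safe margin (-9000) below CPython's recursion limit, at which A raises RecursionError.
-- outside the precondition, e.g. on spiral_dance(0, -9500): A returns 75, B returns 75
-- crash fix: On deeply negative steps in the band -2000000 <= steps <= -11000 A's recursion depth 6 - steps exceeds CPython's recursion limit and A raises RecursionError, while B's while-loop returns the normal iterated value (75 at the witness (0, -20000)). — e.g. on spiral_dance(0, -20000): A raises RecursionError, B returns 75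
import Mathlib
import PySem

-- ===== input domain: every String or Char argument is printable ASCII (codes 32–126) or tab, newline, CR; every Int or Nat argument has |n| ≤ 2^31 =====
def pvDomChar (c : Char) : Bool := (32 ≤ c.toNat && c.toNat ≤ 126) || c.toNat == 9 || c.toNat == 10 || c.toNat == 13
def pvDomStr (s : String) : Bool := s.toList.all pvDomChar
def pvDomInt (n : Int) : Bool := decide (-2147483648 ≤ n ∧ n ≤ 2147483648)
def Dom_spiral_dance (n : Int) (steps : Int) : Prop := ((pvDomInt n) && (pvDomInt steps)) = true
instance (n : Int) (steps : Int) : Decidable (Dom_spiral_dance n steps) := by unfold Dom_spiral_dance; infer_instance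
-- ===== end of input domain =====

-- B replaces A's fixed-depth tail recursion by an iterative while-loop over the remaining step count (return value equivalence; idiomatic objective).

-- ===== PORT A =====
-- Literal port of A's recursion; terminates because each call increases steps toward the cap 6.
def spiral_dance (n : Int) (steps : Int) : Int :=
  if steps ≥ 6 then n
  else if n < 10 then spiral_dance (n + 13) (steps + 1)
  else if n > 100 then spiral_dance (PySem.Int.floordiv n 2 - 7) (steps + 1)
  else spiral_dance (PySem.Int.mod (n * 3) 137) (steps + 1)
termination_by (6 - steps).toNat
decreasing_by all_goals omega

-- ===== PORT B =====
-- One iteration of Source B's while-loop body (the three-way branch updating n).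
def spiralStep (n : Int) : Int :=
  if n < 10 then n + 13
  else if n > 100 then PySem.Int.floordiv n 2 - 7
  else PySem.Int.mod (n * 3) 137

-- Source B's 'while steps < 6' loop, run on the remaining iteration count.
def spiralLoop (n : Int) : Nat → Int
  | 0 => n
  | k + 1 => spiralLoop (spiralStep n) k

def spiral_dance_alt (n : Int) (steps : Int) : Int :=
  spiralLoop n (6 - steps).toNat

-- ===== PRECONDITION & SPEC =====
-- Pre_ excludes deeply negative steps, on which A's recursion depth (6 - steps) exceeds CPython's
-- recursion limit and A raises RecursionError; the bound -9000 keeps a safe margin below the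
-- runtime-dependent cutoff (observed at limit 10000: A returns at steps = -9990, raises at steps = -11000).
def Pre_spiral_dance (n : Int) (steps : Int) : Prop := -9000 ≤ steps
instance (n : Int) (steps : Int) : Decidable (Pre_spiral_dance n steps) := by unfold Pre_spiral_dance; infer_instance
def pvWitness_spiral_dance : Int × Int := (42, 0)

-- A raises RecursionError on deeply negative steps (the band -2000000 ≤ steps ≤ -11000) while B's loop returns the normal iterated value in a few million cheap iterations.
def Raises_spiral_dance (n : Int) (steps : Int) : Prop := steps ≤ -11000 ∧ -2000000 ≤ steps
instance (n : Int) (steps : Int) : Decidable (Raises_spiral_dance n steps) := by unfold Raises_spiral_dance; infer_instance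
def pvRaiseWitness_spiral_dance : Int × Int := (0, -20000)
def pvRaiseWitnessOut_spiral_dance : Int := 75

def Spec_spiral_dance (n : Int) (steps : Int) (out : Int) : Prop := out = spiral_dance_alt n steps
instance (n : Int) (steps : Int) (out : Int) : Decidable (Spec_spiral_dance n steps out) := by unfold Spec_spiral_dance; infer_instance

-- ===== CLAIM (what is proved, stated in full; the proofs are below) =====
def Claim_equal_spiral_dance : Prop := ∀ (n : Int) (steps : Int), Dom_spiral_dance n steps → Pre_spiral_dance n steps → Spec_spiral_dance n steps (spiral_dance n steps)
def Claim_raises_spiral_dance : Prop := (∀ (n : Int) (steps : Int), Dom_spiral_dance n steps → Raises_spiral_dance n steps → ¬ Pre_spiral_dance n steps) ∧ (Dom_spiral_dance (pvRaiseWitness_spiral_dance.1) (pvRaiseWitness_spiral_dance.2) ∧ Raises_spiral_dance (pvRaiseWitness_spiral_dance.1) (pvRaiseWitness_spiral_dance.2) ∧ spiral_dance_alt (pvRaiseWitness_spiral_dance.1) (pvRaiseWitness_spiral_dance.2) = pvRaiseWitnessOut_spiral_dance)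

-- ===== LEMMAS AND PROOFS =====

-- A's recursion equals B's loop run for the remaining (6 - steps) iterations.
theorem spiral_dance_eq_loop (k : Nat) : ∀ (n steps : Int), (6 - steps).toNat = k → spiral_dance n steps = spiralLoop n k := by
  induction k with
  | zero =>
    intro n steps hk
    have h6 : steps ≥ 6 := by omega
    rw [spiral_dance]
    simp [h6, spiralLoop]
  | succ k ih =>
    intro n steps hk
    have h6 : ¬ steps ≥ 6 := by omega
    have hk' : (6 - (steps + 1)).toNat = k := by omega
    rw [spiral_dance]
    simp only [h6, if_false, spiralLoop, spiralStep]
    by_cases h1 : n < 10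
    · simp only [h1, if_true]; exact ih _ _ hk'
    · by_cases h2 : n > 100
      · simp only [h1, if_false, h2, if_true]; exact ih _ _ hk'
      · simp only [h1, if_false, h2]; exact ih _ _ hk'

-- ===== VERDICT (by name: the statement is the Claim_ definition above) =====
theorem spiral_dance_spec : Claim_equal_spiral_dance := by
  intro n steps _ _
  unfold Spec_spiral_dance spiral_dance_alt
  exact spiral_dance_eq_loop _ n steps rfl

-- spiralLoop splits over an iteration-count sum (used to evaluate the deep raise witness).
theorem spiralLoop_add (a : Nat) : ∀ (n : Int) (b : Nat), spiralLoop n (a + b) = spiralLoop (spiralLoop n a) b := by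
  induction a with
  | zero => intro n b; simp [spiralLoop]
  | succ a ih =>
    intro n b
    have h : a + 1 + b = (a + b) + 1 := by omega
    rw [h]
    show spiralLoop (spiralStep n) (a + b) = spiralLoop (spiralLoop (spiralStep n) a) b
    exact ih _ b

-- 56 lies on a 10-cycle of spiralStep.
theorem spiralLoop_cycle (m : Nat) : spiralLoop 56 (10 * m) = 56 := by
  induction m with
  | zero => rfl
  | succ m ih =>
    have h : 10 * (m + 1) = 10 * m + 10 := by omega
    rw [h, spiralLoop_add, ih]
    decide

-- B's value at the raise witness, evaluated via the split and cycle lemmas.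
set_option maxRecDepth 2000 in
theorem spiralLoop_witness : spiralLoop 0 (6 - (-20000 : Int)).toNat = 75 := by
  have h : ((6 - (-20000 : Int)).toNat) = 29 + (10 * 1997 + 7) := by decide
  rw [h, spiralLoop_add]
  have h29 : spiralLoop 0 29 = 56 := by decide
  rw [h29, spiralLoop_add, spiralLoop_cycle]
  decide

@[simp] theorem spiral_dance_raises : Claim_raises_spiral_dance := by
  unfold Claim_raises_spiral_dance
  constructor
  · intro n steps _ hr
    unfold Raises_spiral_dance at hr
    unfold Pre_spiral_dance
    omega
  · exact ⟨by decide, by decide, spiralLoop_witness⟩
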